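-- pv_equiv track=rewrite | github.com/LxShane/WMCS-1 | system_a_cognitive/logic/data_filler.py | get_fill_priority
-- ===== SOURCE A (Python) =====
-- from typing import Dict, List, Optional, Tuple
--
-- def get_fill_priority(missing: Dict) -> List[Tuple[str, str]]:
--     """
--     Prioritize which fields to fill first.
--     Returns list of (category, field) tuples in priority order.
--     """
--     priority_order = [
--         "CORE", "GROUNDING", "CLASSIFICATION",
--         "SUBSTANCE", "ARRANGEMENT", "CAUSATION",
--         "DYNAMICS", "TIME", "CONNECTIONS"
--     ]
--
--     result = []
--     for cat in priority_order:
--         if cat in missing: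
--             for field in missing[cat]:
--                 result.append((cat, field))
--
--     return result
-- ===== SOURCE B (Python) =====
-- def get_fill_priority(missing):
--     """
--     Prioritize which fields to fill first.
--     Returns list of (category, field) tuples in priority order.
--     """
--     order = [
--         "CORE", "GROUNDING", "CLASSIFICATION",
--         "SUBSTANCE", "ARRANGEMENT", "CAUSATION",
--         "DYNAMICS", "TIME", "CONNECTIONS"
--     ]
--     buckets = {c: [] for c in order}
--     for cat, fields in missing.items():
--         if cat in buckets:
--             buckets[cat] = buckets[cat] + [(cat, f) for f in fields]
--     return [pair for c in order for pair in buckets[c]]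
-- ===== Notes on version B (the rewrite author's own statement) =====
-- stated objective: alternative
-- what changed: B makes one pass over the input dict, grouping each entry's fields into per-category buckets prebuilt from the priority list, then flattens the buckets in priority order, instead of A's scan of the fixed priority list with a membership test and lookup into the input for each category.
import Mathlib
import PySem

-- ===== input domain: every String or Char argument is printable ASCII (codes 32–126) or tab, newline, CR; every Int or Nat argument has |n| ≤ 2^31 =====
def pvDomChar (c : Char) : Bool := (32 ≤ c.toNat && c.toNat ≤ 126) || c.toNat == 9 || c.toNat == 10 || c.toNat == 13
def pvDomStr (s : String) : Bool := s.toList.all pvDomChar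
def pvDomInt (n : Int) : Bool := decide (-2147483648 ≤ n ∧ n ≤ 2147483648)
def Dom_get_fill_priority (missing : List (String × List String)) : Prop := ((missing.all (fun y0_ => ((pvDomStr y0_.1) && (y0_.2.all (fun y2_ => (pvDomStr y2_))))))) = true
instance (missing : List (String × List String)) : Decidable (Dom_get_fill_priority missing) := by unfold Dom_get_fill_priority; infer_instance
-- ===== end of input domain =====

-- B replaces A's scan of the fixed priority list (with a membership test and a lookup
-- into the input for each category) by one grouping pass over the input into prebuilt
-- per-category buckets, flattened at the end; objective: alternative (same cost).

-- ===== PORT A =====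
def get_fill_priority (missing : List (String × List String)) : List (String × String) :=
  let priority_order : List String :=
    ["CORE", "GROUNDING", "CLASSIFICATION",
     "SUBSTANCE", "ARRANGEMENT", "CAUSATION",
     "DYNAMICS", "TIME", "CONNECTIONS"]
  priority_order.foldl (fun result cat =>
    if (PySem.Dict.mk missing).contains cat then
      ((PySem.Dict.mk missing).getD cat []).foldl (fun r field => r ++ [(cat, field)]) result
    else result) []

-- ===== PORT B =====
-- the fixed category order of Source B
def gfpOrder : List String :=
  ["CORE", "GROUNDING", "CLASSIFICATION",
   "SUBSTANCE", "ARRANGEMENT", "CAUSATION",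
   "DYNAMICS", "TIME", "CONNECTIONS"]

def get_fill_priority_alt (missing : List (String × List String)) : List (String × String) :=
  let buckets0 : PySem.Dict String (List (String × String)) :=
    gfpOrder.foldl (fun d c => d.insert c []) PySem.Dict.empty
  let buckets :=
    missing.foldl (fun d p =>
      if d.contains p.1 then
        d.insert p.1 (d.getD p.1 [] ++ p.2.map (fun f => (p.1, f)))
      else d) buckets0
  gfpOrder.flatMap (fun c => buckets.getD c [])

-- ===== PRECONDITION & SPEC =====
-- Pre_ excludes association lists with duplicate keys: they do not represent any Python
-- dict (A's parameter is a dict, whose keys are unique), so no Python input is excluded.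
def Pre_get_fill_priority (missing : List (String × List String)) : Prop :=
  (missing.map Prod.fst).Nodup
instance (missing : List (String × List String)) : Decidable (Pre_get_fill_priority missing) := by
  unfold Pre_get_fill_priority; infer_instance

def pvWitness_get_fill_priority : (List (String × List String)) :=
  [("TIME", ["when"]), ("CORE", ["id", "name"]), ("weird", ["x"])]

def Spec_get_fill_priority (missing : List (String × List String)) (out : List (String × String)) : Prop := out = get_fill_priority_alt missing
instance (missing : List (String × List String)) (out : List (String × String)) : Decidable (Spec_get_fill_priority missing out) := by unfold Spec_get_fill_priority; infer_instance

-- ===== CLAIM (what is proved, stated in full; the proofs are below) =====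
def Claim_equal_get_fill_priority : Prop := ∀ (missing : List (String × List String)), Dom_get_fill_priority missing → Pre_get_fill_priority missing → Spec_get_fill_priority missing (get_fill_priority missing)

-- ===== LEMMAS AND PROOFS =====

-- the grouping step of B's loop
def gfpStep (d : PySem.Dict String (List (String × String))) (p : String × List String) :
    PySem.Dict String (List (String × String)) :=
  if d.contains p.1 then
    d.insert p.1 (d.getD p.1 [] ++ p.2.map (fun f => (p.1, f)))
  else d

-- What B's grouping loop leaves at key c: the first-match fields of c in the input,
-- appended to the accumulator's bucket — provided keys are distinct.
lemma gfp_bucket_get? (l : List (String × List String))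
    (hnd : (l.map Prod.fst).Nodup) (d : PySem.Dict String (List (String × String)))
    (c : String) :
    (l.foldl gfpStep d).get? c =
      (d.get? c).map (fun v =>
        v ++ (((PySem.Dict.mk l).get? c).getD []).map (fun f => (c, f))) := by
  induction l generalizing d with
  | nil =>
    have hm : (PySem.Dict.mk ([] : List (String × List String))).get? c = none := rfl
    cases h : d.get? c <;> simp [hm, h]
  | cons p rest ih =>
    obtain ⟨k, fs⟩ := p
    simp only [List.map_cons, List.nodup_cons] at hnd
    obtain ⟨hknot, hndrest⟩ := hnd
    by_cases hkc : k = c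
    · subst hkc
      -- rest contains no entry with key k, so its first-match lookup is none
      have hrest : (PySem.Dict.mk rest).get? k = none := by
        rw [PySem.Dict.get?_eq_none_iff_not_mem_keys]
        simpa [PySem.Dict.keys, PySem.Dict.mk] using hknot
      rw [List.foldl_cons, ih hndrest]
      cases h : d.get? k with
      | none =>
        have hcont : d.contains k = false := by
          rw [PySem.Dict.contains_eq_isSome_get?, h]; rfl
        simp [gfpStep, hcont, h, PySem.Dict.get?_mk_cons]
      | some v =>
        have hcont : d.contains k = true := by
          rw [PySem.Dict.contains_eq_isSome_get?, h]; rfl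
        have hgetD : d.getD k [] = v := PySem.Dict.getD_of_get?_eq_some d [] h
        simp [gfpStep, hcont, hgetD, PySem.Dict.get?_insert_self,
              PySem.Dict.get?_mk_cons, hrest]
    · rw [List.foldl_cons, ih hndrest]
      have hstep : (gfpStep d (k, fs)).get? c = d.get? c := by
        unfold gfpStep
        split
        · exact PySem.Dict.get?_insert_of_ne d _ (fun h => hkc h.symm)
        · rfl
      rw [hstep]
      have : (PySem.Dict.mk ((k, fs) :: rest)).get? c = (PySem.Dict.mk rest).get? c := by
        rw [PySem.Dict.get?_mk_cons]
        simp [hkc]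
      rw [this]

-- B's initial buckets hold some [] at every category of the order.
lemma gfp_buckets0_get? (c : String) (hc : c ∈ gfpOrder) :
    (gfpOrder.foldl (fun d c => d.insert c []) PySem.Dict.empty
      : PySem.Dict String (List (String × String))).get? c = some [] := by
  fin_cases hc <;> decide

-- Per-category value of B's final buckets, for each category of the order.
lemma gfp_bucket_final (missing : List (String × List String))
    (hnd : (missing.map Prod.fst).Nodup) (c : String) (hc : c ∈ gfpOrder) :
    (missing.foldl (fun d p =>
        if d.contains p.1 then
          d.insert p.1 (d.getD p.1 [] ++ p.2.map (fun f => (p.1, f)))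
        else d)
        ((["CORE", "GROUNDING", "CLASSIFICATION",
           "SUBSTANCE", "ARRANGEMENT", "CAUSATION",
           "DYNAMICS", "TIME", "CONNECTIONS"] : List String).foldl
          (fun d c => d.insert c []) PySem.Dict.empty)).getD c [] =
      (((PySem.Dict.mk missing).get? c).getD []).map (fun f => (c, f)) := by
  show (missing.foldl gfpStep
      (gfpOrder.foldl (fun d c => d.insert c []) PySem.Dict.empty)).getD c [] = _
  have := gfp_bucket_get? missing hnd
    (gfpOrder.foldl (fun d c => d.insert c []) PySem.Dict.empty) c
  rw [gfp_buckets0_get? c hc] at this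
  rw [PySem.Dict.getD_eq_get?_getD, this]
  simp

-- A's per-category segment: the guarded inner loop appends the first-match fields, mapped.
lemma gfp_a_segment (missing : List (String × List String)) (cat : String)
    (result : List (String × String)) :
    (if (PySem.Dict.mk missing).contains cat then
      ((PySem.Dict.mk missing).getD cat []).foldl
        (fun r field => r ++ [(cat, field)]) result
    else result) =
      result ++ (((PySem.Dict.mk missing).get? cat).getD []).map (fun f => (cat, f)) := by
  cases h : (PySem.Dict.mk missing).get? cat with
  | none =>
    have hcont : (PySem.Dict.mk missing).contains cat = false := by
      rw [PySem.Dict.contains_eq_isSome_get?, h]; rfl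
    simp [hcont]
  | some fs =>
    have hcont : (PySem.Dict.mk missing).contains cat = true := by
      rw [PySem.Dict.contains_eq_isSome_get?, h]; rfl
    simp only [hcont, if_true, PySem.Dict.getD_of_get?_eq_some _ [] h,
          PySem.List.foldl_append_singleton_eq_map, Option.getD_some]

-- ===== VERDICT (by name: the statement is the Claim_ definition above) =====
theorem get_fill_priority_spec : Claim_equal_get_fill_priority := by
  intro missing _ hpre
  unfold Spec_get_fill_priority get_fill_priority get_fill_priority_alt
  have hb := gfp_bucket_final missing hpre
  simp only [List.foldl_cons, List.foldl_nil, gfp_a_segment]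
  simp only [gfpOrder, List.flatMap_cons, List.flatMap_nil]
  rw [hb "CORE" (by decide), hb "GROUNDING" (by decide), hb "CLASSIFICATION" (by decide),
      hb "SUBSTANCE" (by decide), hb "ARRANGEMENT" (by decide), hb "CAUSATION" (by decide),
      hb "DYNAMICS" (by decide), hb "TIME" (by decide), hb "CONNECTIONS" (by decide)]
  simp
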